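-- pv_equiv track=rewrite | github.com/SKantar/InterviewBit | 07_DynamicProgramming/queen_attack.py | queenAttack
-- ===== SOURCE A (Python) =====
-- def queenAttack(A):
--     n, m = len(A), len(A) and len(A[0]) or 0
--
--     dp = [[0] * m for _ in range(n)]
--
--     directions = (
--         (-1, -1), (-1, 0), (-1, 1), (0, 1),
--         (1, 1), (1, 0), (1, -1), (0, -1)
--     )
--
--     for i in range(n):
--         for j in range(m):
--             if A[i][j] == '0':
--                 continue
--             for d in directions:
--                 tx, ty = i + d[0], j + d[1]
--                 while 0 <= tx < n and 0 <= ty < m: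
--                     dp[tx][ty] += 1
--                     if A[tx][ty] == '1':
--                         break
--                     tx, ty = tx + d[0], ty + d[1]
--     return dp
-- ===== SOURCE B (Python) =====
-- def queenAttack(A):
--     # Gather formulation: each cell independently counts, in each of the 8
--     # directions, the queens it can see (pure reads; no shared dp mutation).
--     n = len(A)
--     m = len(A[0]) if n else 0
--     directions = (
--         (-1, -1), (-1, 0), (-1, 1), (0, 1),
--         (1, 1), (1, 0), (1, -1), (0, -1)
--     )
--
--     def seen(x, y, dx, dy):
--         cnt = 0
--         tx, ty = x + dx, y + dy
--         while 0 <= tx < n and 0 <= ty < m: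
--             c = A[tx][ty]
--             if c != '0':
--                 cnt += 1
--             if c == '1':
--                 break
--             tx, ty = tx + dx, ty + dy
--         return cnt
--
--     return [[sum(seen(x, y, dx, dy) for dx, dy in directions)
--              for y in range(m)] for x in range(n)]
-- ===== Notes on version B (the rewrite author's own statement) =====
-- stated objective: alternative
-- what changed: A scatters: it iterates over every queen cell and mutates a shared dp grid along each outgoing ray; B gathers: each output cell is computed independently and purely by walking the 8 directions from that cell and counting the queens it can see, with no shared mutable grid.
import Mathlib
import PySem

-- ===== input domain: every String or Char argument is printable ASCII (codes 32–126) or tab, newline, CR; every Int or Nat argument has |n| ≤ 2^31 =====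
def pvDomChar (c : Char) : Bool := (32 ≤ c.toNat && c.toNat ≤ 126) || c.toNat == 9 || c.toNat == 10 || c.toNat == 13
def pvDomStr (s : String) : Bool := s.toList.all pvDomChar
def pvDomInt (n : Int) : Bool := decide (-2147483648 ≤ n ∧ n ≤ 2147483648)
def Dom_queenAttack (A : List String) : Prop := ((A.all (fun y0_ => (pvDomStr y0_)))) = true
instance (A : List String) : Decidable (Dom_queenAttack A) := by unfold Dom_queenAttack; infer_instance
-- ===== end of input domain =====

-- B replaces A's scatter (mutating a shared dp grid along rays from each queen) by an
-- independent pure per-cell gather over the 8 directions; same exact values (objective: alternative).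


-- ===== PORT A =====
-- shared accessors (both Pythons read len(A), len(A[0]) and chars A[i][j] the same way)
def qaM (A : List String) : Int := if A.length = 0 then 0 else ((A.headD "").toList.length : Int)

def qaCell (A : List String) (i j : Int) : Char := ((A.getD i.toNat "").toList.getD j.toNat '?')

def qaInb (A : List String) (p : Int × Int) : Bool :=
  decide (0 ≤ p.1 ∧ p.1 < (A.length : Int) ∧ 0 ≤ p.2 ∧ p.2 < qaM A)

def qaFuel (A : List String) : Nat := A.length + (qaM A).toNat + 1

def qaDirs : List (Int × Int) := [(-1,-1),(-1,0),(-1,1),(0,1),(1,1),(1,0),(1,-1),(0,-1)]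

-- dp[tx][ty] += 1
def qaUpd (dp : List (List Int)) (p : Int × Int) : List (List Int) :=
  dp.modify p.1.toNat (fun row => row.modify p.2.toNat (· + 1))

-- the inner `while` loop of A (fuel qaFuel A always suffices: a ray has < n + m cells)
def qaWalk (A : List String) (d : Int × Int) : Nat → Int × Int → List (List Int) → List (List Int)
  | 0, _, dp => dp
  | f+1, p, dp =>
    if qaInb A p then
      let dp' := qaUpd dp p
      if qaCell A p.1 p.2 = '1' then dp'
      else qaWalk A d f (p.1 + d.1, p.2 + d.2) dp'
    else dp

def queenAttack (A : List String) : List (List Int) :=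
  let n := A.length
  let m := (qaM A).toNat
  let dp0 := List.replicate n (List.replicate m (0 : Int))
  (List.range n).foldl (fun dp (i : Nat) =>
    (List.range m).foldl (fun dp (j : Nat) =>
      if qaCell A i j = '0' then dp
      else qaDirs.foldl (fun dp d => qaWalk A d (qaFuel A) ((i : Int) + d.1, (j : Int) + d.2) dp) dp)
      dp) dp0

-- ===== PORT B =====
-- the `while` loop of B's helper `seen` (pure count, no grid)
def qaGath (A : List String) (d : Int × Int) : Nat → Int × Int → Int
  | 0, _ => 0
  | f+1, p =>
    if qaInb A p then
      (if qaCell A p.1 p.2 ≠ '0' then 1 else 0) +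
      (if qaCell A p.1 p.2 = '1' then 0 else qaGath A d f (p.1 + d.1, p.2 + d.2))
    else 0

def queenAttack_alt (A : List String) : List (List Int) :=
  let n := A.length
  let m := (qaM A).toNat
  (List.range n).map (fun (x : Nat) =>
    (List.range m).map (fun (y : Nat) =>
      qaDirs.foldl (fun s d => s + qaGath A d (qaFuel A) ((x : Int) + d.1, (y : Int) + d.2)) 0))

-- ===== PRECONDITION & SPEC =====
-- Pre_ excludes exactly the ragged inputs (some row shorter than row 0), on which the Python A
-- raises IndexError (and B raises there too).
def Pre_queenAttack (A : List String) : Prop :=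
  ∀ s ∈ A, (A.headD "").toList.length ≤ s.toList.length

instance (A : List String) : Decidable (Pre_queenAttack A) := by
  unfold Pre_queenAttack; infer_instance

def pvWitness_queenAttack : List String := ["10", "01"]

def Spec_queenAttack (A : List String) (out : List (List Int)) : Prop := out = queenAttack_alt A
instance (A : List String) (out : List (List Int)) : Decidable (Spec_queenAttack A out) := by
  unfold Spec_queenAttack; infer_instance

-- ===== CLAIM (what is proved, stated in full; the proofs are below) =====
def Claim_equal_queenAttack : Prop :=
  ∀ (A : List String), Dom_queenAttack A → Pre_queenAttack A → Spec_queenAttack A (queenAttack A)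

-- ===== LEMMAS AND PROOFS =====

-- the list of cells a single A-walk increments
def qaRay (A : List String) (d : Int × Int) : Nat → Int × Int → List (Int × Int)
  | 0, _ => []
  | f+1, p =>
    if qaInb A p then
      p :: (if qaCell A p.1 p.2 = '1' then [] else qaRay A d f (p.1 + d.1, p.2 + d.2))
    else []

-- all increments performed by A, flattened into one list of positions
def qaL (A : List String) : List (Int × Int) :=
  (List.range A.length).flatMap (fun (i : Nat) =>
    (List.range (qaM A).toNat).flatMap (fun (j : Nat) =>
      if qaCell A i j = '0' then []
      else qaDirs.flatMap (fun d => qaRay A d (qaFuel A) ((i : Int) + d.1, (j : Int) + d.2))))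

-- steps-to-leave-the-board measure along direction d
def qaMu (A : List String) (d : Int × Int) (s : Int × Int) : Int :=
  (if 0 ≤ d.1 then (A.length : Int) - s.1 else s.1 + 1) +
  (if 0 ≤ d.2 then qaM A - s.2 else s.2 + 1)

def qaEntry (dp : List (List Int)) (x y : Nat) : Int := (dp.getD x []).getD y 0


theorem qaFoldl_flatMap {α β γ : Type} (g : α → List β) (f : γ → β → γ) :
    ∀ (xs : List α) (init : γ),
      (xs.flatMap g).foldl f init = xs.foldl (fun acc x => (g x).foldl f acc) init := by
  intro xs
  induction xs with
  | nil => intro init; rfl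
  | cons x xs ih => intro init; simp [List.flatMap_cons, List.foldl_append, ih]

theorem qaWalk_eq_foldl (A : List String) (d : Int × Int) :
    ∀ (f : Nat) (p : Int × Int) (dp : List (List Int)),
      qaWalk A d f p dp = (qaRay A d f p).foldl qaUpd dp := by
  intro f
  induction f with
  | zero => intro p dp; simp [qaWalk, qaRay]
  | succ f ih =>
    intro p dp
    by_cases h1 : qaInb A p = true
    · by_cases h2 : qaCell A p.1 p.2 = '1'
      · simp [qaWalk, qaRay, h1, h2]
      · simp [qaWalk, qaRay, h1, h2, ih]
    · simp [qaWalk, qaRay, h1]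

theorem qaA_eq_foldl (A : List String) :
    queenAttack A =
      (qaL A).foldl qaUpd
        (List.replicate A.length (List.replicate (qaM A).toNat (0 : Int))) := by
  have hbody : ∀ (i j : Nat) (dp : List (List Int)),
      (if qaCell A i j = '0' then dp
       else qaDirs.foldl (fun dp d => qaWalk A d (qaFuel A) ((i:Int)+d.1,(j:Int)+d.2) dp) dp)
      = ((if qaCell A i j = '0' then ([] : List (Int × Int))
          else qaDirs.flatMap (fun d => qaRay A d (qaFuel A) ((i:Int)+d.1,(j:Int)+d.2))).foldl qaUpd dp) := by
    intro i j dp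
    by_cases h : qaCell A i j = '0'
    · simp [h]
    · rw [if_neg h, if_neg h, qaFoldl_flatMap]
      have heq : (fun (dp : List (List Int)) (d : Int × Int) =>
            qaWalk A d (qaFuel A) ((i:Int)+d.1,(j:Int)+d.2) dp)
          = (fun dp d => (qaRay A d (qaFuel A) ((i:Int)+d.1,(j:Int)+d.2)).foldl qaUpd dp) := by
        funext dp d
        exact qaWalk_eq_foldl A d _ _ dp
      rw [heq]
  simp only [queenAttack, qaL]
  rw [qaFoldl_flatMap]
  refine List.foldl_ext _ _ _ ?_
  intro dp i hi
  rw [qaFoldl_flatMap]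
  refine List.foldl_ext _ _ _ ?_
  intro dp j hj
  exact hbody i j dp

theorem qaRay_inb (A : List String) (d : Int × Int) :
    ∀ (f : Nat) (s q : Int × Int), q ∈ qaRay A d f s → qaInb A q = true := by
  intro f
  induction f with
  | zero => intro s q hq; simp [qaRay] at hq
  | succ f ih =>
    intro s q hq
    by_cases h1 : qaInb A s = true
    · by_cases h2 : qaCell A s.1 s.2 = '1'
      · simp [qaRay, h1, h2] at hq; subst hq; exact h1
      · simp [qaRay, h1, h2] at hq
        rcases hq with hq | hq
        · subst hq; exact h1
        · exact ih _ _ hq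
    · simp [qaRay, h1] at hq

theorem qaRay_fwd (A : List String) (d : Int × Int) :
    ∀ (f : Nat) (s q : Int × Int), q ∈ qaRay A d f s →
      ∃ k : Nat, q.1 = s.1 + (k : Int) * d.1 ∧ q.2 = s.2 + (k : Int) * d.2 := by
  intro f
  induction f with
  | zero => intro s q hq; simp [qaRay] at hq
  | succ f ih =>
    intro s q hq
    by_cases h1 : qaInb A s = true
    · by_cases h2 : qaCell A s.1 s.2 = '1'
      · simp [qaRay, h1, h2] at hq; subst hq; exact ⟨0, by simp⟩
      · simp [qaRay, h1, h2] at hq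
        rcases hq with hq | hq
        · subst hq; exact ⟨0, by simp⟩
        · obtain ⟨k, hk1, hk2⟩ := ih _ _ hq
          refine ⟨k + 1, ?_, ?_⟩
          · simp at hk1 ⊢; rw [hk1]; ring
          · simp at hk2 ⊢; rw [hk2]; ring
    · simp [qaRay, h1] at hq

theorem qaRay_self_not_mem (A : List String) (d : Int × Int)
    (hd : d ∈ qaDirs) (f : Nat) (p : Int × Int) :
    p ∉ qaRay A d f (p.1 + d.1, p.2 + d.2) := by
  intro hmem
  obtain ⟨k, h1, h2⟩ := qaRay_fwd A d f _ p hmem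
  simp at h1 h2
  fin_cases hd <;> simp at h1 h2 <;> omega

theorem qaRay_count (A : List String) (d : Int × Int) (hd : d ∈ qaDirs) :
    ∀ (f : Nat) (s p : Int × Int),
      (qaRay A d f s).count p = if p ∈ qaRay A d f s then 1 else 0 := by
  intro f
  induction f with
  | zero => intro s p; simp [qaRay]
  | succ f ih =>
    intro s p
    by_cases h1 : qaInb A s = true
    · by_cases h2 : qaCell A s.1 s.2 = '1'
      · rw [show qaRay A d (f+1) s = [s] by simp [qaRay, h1, h2]]
        by_cases h3 : p = s
        · subst h3; simp
        · simp [h3, Ne.symm h3]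
      · by_cases h3 : p = s
        · subst h3
          have hnot : p ∉ qaRay A d f (p.1 + d.1, p.2 + d.2) :=
            qaRay_self_not_mem A d hd f p
          simp [qaRay, h1, h2, List.count_eq_zero.mpr hnot]
        · simp [qaRay, h1, h2, ih, h3, Ne.symm h3]
    · simp [qaRay, h1]


theorem qaDirs_neg_mem (d : Int × Int) (hd : d ∈ qaDirs) : ((-d.1, -d.2) : Int × Int) ∈ qaDirs := by
  fin_cases hd <;> norm_num [qaDirs]

theorem qaM_nonneg (A : List String) : 0 ≤ qaM A := by
  unfold qaM; split <;> simp

theorem qaFuel_cast (A : List String) : (qaFuel A : Int) = (A.length : Int) + qaM A + 1 := by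
  unfold qaFuel
  have := qaM_nonneg A
  push_cast [Int.toNat_of_nonneg this]
  ring

theorem qaMu_dec (A : List String) (d : Int × Int) (hd : d ∈ qaDirs) (s : Int × Int) :
    qaMu A d (s.1 + d.1, s.2 + d.2) ≤ qaMu A d s - 1 := by
  fin_cases hd <;> norm_num [qaMu] <;> omega

theorem qaMu_pos (A : List String) (d s : Int × Int) (h : qaInb A s = true) :
    1 ≤ qaMu A d s := by
  simp [qaInb] at h
  obtain ⟨h1, h2, h3, h4⟩ := h
  unfold qaMu
  split_ifs <;> omega

theorem qaMu_bound (A : List String) (d s : Int × Int) (h : qaInb A s = true) :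
    qaMu A d s ≤ (A.length : Int) + qaM A := by
  simp [qaInb] at h
  obtain ⟨h1, h2, h3, h4⟩ := h
  unfold qaMu
  split_ifs <;> omega

theorem qaRay_not_inb (A : List String) (d s : Int × Int) (h : ¬ qaInb A s = true) :
    ∀ f : Nat, qaRay A d f s = [] := by
  intro f; cases f <;> simp [qaRay, h]

theorem qaRay_stab (A : List String) (d : Int × Int) (hd : d ∈ qaDirs) :
    ∀ (f f' : Nat) (s : Int × Int),
      qaMu A d s < (f : Int) → qaMu A d s < (f' : Int) →
      qaRay A d f s = qaRay A d f' s := by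
  intro f
  induction f with
  | zero =>
    intro f' s h _
    have hnb : ¬ qaInb A s = true := by
      intro hb; have := qaMu_pos A d s hb; simp at h; omega
    rw [qaRay_not_inb A d s hnb, qaRay_not_inb A d s hnb]
  | succ f ih =>
    intro f' s h h'
    cases f' with
    | zero =>
      have hnb : ¬ qaInb A s = true := by
        intro hb; have := qaMu_pos A d s hb; simp at h'; omega
      rw [qaRay_not_inb A d s hnb, qaRay_not_inb A d s hnb]
    | succ g =>
      by_cases h1 : qaInb A s = true
      · by_cases h2 : qaCell A s.1 s.2 = '1'
        · simp [qaRay, h1, h2]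
        · have hmu := qaMu_dec A d hd s
          simp only [qaRay, h1, if_true, if_neg h2]
          congr 1
          push_cast at h h' ⊢
          exact ih g (s.1 + d.1, s.2 + d.2) (by omega) (by omega)
      · rw [qaRay_not_inb A d s h1, qaRay_not_inb A d s h1]

theorem qaRay_prev_not_mem (A : List String) (d : Int × Int)
    (hd : d ∈ qaDirs) (f : Nat) (p : Int × Int) :
    (p.1 - d.1, p.2 - d.2) ∉ qaRay A d f p := by
  intro hmem
  obtain ⟨k, h1, h2⟩ := qaRay_fwd A d f _ _ hmem
  simp at h1 h2
  fin_cases hd <;> simp at h1 h2 <;> omega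

theorem qaRay_mem_rec (A : List String) (d : Int × Int) (hd : d ∈ qaDirs)
    (p : Int × Int) (hp : qaInb A p = true) :
    ∀ (f : Nat) (s : Int × Int),
      qaMu A d s < (f : Int) → qaMu A d s < (qaFuel A : Int) →
      (p ∈ qaRay A d (qaFuel A) s ↔
        s = p ∨ (qaCell A (p.1 - d.1) (p.2 - d.2) ≠ '1' ∧
                 (p.1 - d.1, p.2 - d.2) ∈ qaRay A d (qaFuel A) s)) := by
  intro f
  induction f with
  | zero =>
    intro s h _
    have hnb : ¬ qaInb A s = true := by
      intro hb; have := qaMu_pos A d s hb; simp at h; omega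
    rw [qaRay_not_inb A d s hnb]
    constructor
    · intro hmem; simp at hmem
    · rintro (rfl | ⟨_, hmem⟩)
      · exact absurd hp hnb
      · simp at hmem
  | succ f ih =>
    intro s hf hF
    by_cases h1 : qaInb A s = true
    · obtain ⟨G, hG⟩ : ∃ G, qaFuel A = G + 1 := ⟨A.length + (qaM A).toNat, rfl⟩
      have hGc : (qaFuel A : Int) = (G : Int) + 1 := by rw [hG]; push_cast; ring
      have hmu := qaMu_dec A d hd s
      by_cases h2 : qaCell A s.1 s.2 = '1'
      · have hray : qaRay A d (qaFuel A) s = [s] := by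
          conv_lhs => rw [hG]
          simp [qaRay, h1, h2]
        rw [hray]
        simp only [List.mem_singleton]
        constructor
        · intro h; exact Or.inl h.symm
        · rintro (rfl | ⟨hne, hceq⟩)
          · rfl
          · exfalso
            apply hne
            have e1 : p.1 - d.1 = s.1 := congrArg Prod.fst hceq
            have e2 : p.2 - d.2 = s.2 := congrArg Prod.snd hceq
            rw [e1, e2]; exact h2
      · have hray : qaRay A d (qaFuel A) s =
            s :: qaRay A d (qaFuel A) (s.1 + d.1, s.2 + d.2) := by
          conv_lhs => rw [hG]
          simp only [qaRay, h1, if_true, if_neg h2]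
          congr 1
          apply qaRay_stab A d hd
          · omega
          · omega
        rw [hray]
        have hih := ih (s.1 + d.1, s.2 + d.2)
          (by push_cast at hf ⊢; omega) (by omega)
        have hcs : ((s.1 + d.1, s.2 + d.2) : Int × Int) = p ↔ (p.1 - d.1, p.2 - d.2) = s := by
          constructor <;> intro h
          · have e1 : s.1 + d.1 = p.1 := congrArg Prod.fst h
            have e2 : s.2 + d.2 = p.2 := congrArg Prod.snd h
            refine Prod.ext ?_ ?_ <;> simp <;> omega
          · have e1 : p.1 - d.1 = s.1 := congrArg Prod.fst h
            have e2 : p.2 - d.2 = s.2 := congrArg Prod.snd h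
            refine Prod.ext ?_ ?_ <;> simp <;> omega
        rw [List.mem_cons, hih, List.mem_cons, hcs]
        have himp : (p.1 - d.1, p.2 - d.2) = s → qaCell A (p.1 - d.1) (p.2 - d.2) ≠ '1' := by
          intro he
          have e1 : p.1 - d.1 = s.1 := congrArg Prod.fst he
          have e2 : p.2 - d.2 = s.2 := congrArg Prod.snd he
          rw [e1, e2]; exact h2
        constructor
        · rintro (rfl | (hcs' | ⟨hne, hm⟩))
          · exact Or.inl rfl
          · exact Or.inr ⟨himp hcs', Or.inl hcs'⟩
          · exact Or.inr ⟨hne, Or.inr hm⟩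
        · rintro (rfl | ⟨hne, (hcs' | hm)⟩)
          · exact Or.inl rfl
          · exact Or.inr (Or.inl hcs')
          · exact Or.inr (Or.inr ⟨hne, hm⟩)
    · rw [qaRay_not_inb A d s h1]
      constructor
      · intro hmem; simp at hmem
      · rintro (rfl | ⟨_, hmem⟩)
        · exact absurd hp h1
        · simp at hmem


def qaShape (A : List String) (dp : List (List Int)) : Prop :=
  dp.length = A.length ∧ ∀ (k : Nat) (h : k < dp.length), dp[k].length = (qaM A).toNat

theorem qaGetD_modify {α : Type} (l : List α) (i j : Nat) (f : α → α) (dflt : α) :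
    (l.modify i f).getD j dflt =
      if i = j ∧ j < l.length then f (l.getD j dflt) else l.getD j dflt := by
  by_cases hj : j < l.length
  · rw [List.getD_eq_getElem _ _ (by simpa [List.length_modify] using hj),
        List.getD_eq_getElem _ _ hj, List.getElem_modify]
    split_ifs with h1 h2 h3 <;> first | rfl | (exfalso; tauto)
  · have hlen : l.length ≤ j := by omega
    rw [List.getD_eq_default _ _ (by simpa [List.length_modify] using hlen),
        List.getD_eq_default _ _ hlen]
    simp [hj]

theorem qaShape_upd (A : List String) (dp : List (List Int)) (p : Int × Int)
    (hs : qaShape A dp) : qaShape A (qaUpd dp p) := by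
  obtain ⟨hl, hr⟩ := hs
  constructor
  · simpa [qaUpd, List.length_modify] using hl
  · intro k hk
    have hk' : k < dp.length := by simpa [qaUpd, List.length_modify] using hk
    unfold qaUpd
    rw [List.getElem_modify]
    split
    · rw [List.length_modify]; exact hr k hk'
    · exact hr k hk'

theorem qaShape_foldl (A : List String) :
    ∀ (L : List (Int × Int)) (dp : List (List Int)),
      qaShape A dp → qaShape A (L.foldl qaUpd dp) := by
  intro L
  induction L with
  | nil => intro dp hs; exact hs
  | cons p L ih => intro dp hs; exact ih (qaUpd dp p) (qaShape_upd A dp p hs)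

theorem qaShape_init (A : List String) :
    qaShape A (List.replicate A.length (List.replicate (qaM A).toNat (0 : Int))) := by
  constructor
  · simp
  · intro k hk; simp

theorem qaEntry_init (A : List String) (x y : Nat) :
    qaEntry (List.replicate A.length (List.replicate (qaM A).toNat (0 : Int))) x y = 0 := by
  simp only [qaEntry, List.getD, List.getElem?_replicate]
  split_ifs <;> simp

theorem qaEntry_upd (A : List String) (dp : List (List Int)) (p : Int × Int)
    (hs : qaShape A dp) (hp : qaInb A p = true) (x y : Nat)
    (hx : x < A.length) (hy : y < (qaM A).toNat) :
    qaEntry (qaUpd dp p) x y =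
      qaEntry dp x y + (if p = ((x : Int), (y : Int)) then 1 else 0) := by
  obtain ⟨hl, hr⟩ := hs
  simp only [qaInb, decide_eq_true_eq] at hp
  obtain ⟨hp1, hp2, hp3, hp4⟩ := hp
  have hxdp : x < dp.length := by omega
  have hrowlen : (dp.getD x []).length = (qaM A).toNat := by
    rw [List.getD_eq_getElem _ _ hxdp]; exact hr x hxdp
  unfold qaEntry qaUpd
  rw [qaGetD_modify]
  by_cases hc1 : p.1.toNat = x ∧ x < dp.length
  · rw [if_pos hc1, qaGetD_modify]
    by_cases hc2 : p.2.toNat = y ∧ y < (dp.getD x []).length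
    · rw [if_pos hc2]
      have : p = ((x : Int), (y : Int)) := by
        refine Prod.ext ?_ ?_ <;> simp <;> omega
      rw [if_pos this]
    · rw [if_neg hc2]
      have : ¬ p = ((x : Int), (y : Int)) := by
        intro he
        apply hc2
        have e1 : p.1 = (x : Int) := congrArg Prod.fst he
        have e2 : p.2 = (y : Int) := congrArg Prod.snd he
        constructor
        · omega
        · omega
      rw [if_neg this]
      ring
  · rw [if_neg hc1]
    have : ¬ p = ((x : Int), (y : Int)) := by
      intro he
      apply hc1
      have e1 : p.1 = (x : Int) := congrArg Prod.fst he
      constructor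
      · omega
      · omega
    rw [if_neg this]
    ring

theorem qaEntry_foldl (A : List String) (x y : Nat)
    (hx : x < A.length) (hy : y < (qaM A).toNat) :
    ∀ (L : List (Int × Int)) (dp : List (List Int)),
      qaShape A dp → (∀ p ∈ L, qaInb A p = true) →
      qaEntry (L.foldl qaUpd dp) x y =
        qaEntry dp x y + (L.count ((x : Int), (y : Int)) : Int) := by
  intro L
  induction L with
  | nil => intro dp hs hL; simp
  | cons p L ih =>
    intro dp hs hL
    rw [List.foldl_cons,
        ih (qaUpd dp p) (qaShape_upd A dp p hs) (fun q hq => hL q (List.mem_cons_of_mem p hq)),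
        qaEntry_upd A dp p hs (hL p List.mem_cons_self) x y hx hy,
        List.count_cons]
    by_cases he : p = ((x : Int), (y : Int))
    · simp [he]; omega
    · simp [he]

theorem qaCount_flatMap {α β : Type} [BEq β] (g : α → List β) (a : β) :
    ∀ xs : List α,
      ((xs.flatMap g).count a) = (xs.map (fun x => (g x).count a)).sum := by
  intro xs
  induction xs with
  | nil => rfl
  | cons x xs ih => simp [List.flatMap_cons, List.count_append, ih]

theorem qaSum_congr {α M : Type} [AddCommMonoid M] (l : List α) (f g : α → M)
    (h : ∀ x ∈ l, f x = g x) : (l.map f).sum = (l.map g).sum := by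
  rw [List.map_congr_left h]

theorem qaSum_swap {α β M : Type} [AddCommMonoid M] (f : α → β → M) :
    ∀ (xs : List α) (ys : List β),
      (xs.map (fun x => (ys.map (f x)).sum)).sum =
        (ys.map (fun y => (xs.map (fun x => f x y)).sum)).sum := by
  intro xs
  induction xs with
  | nil => intro ys; simp
  | cons x xs ih =>
    intro ys
    simp only [List.map_cons, List.sum_cons, ih ys]
    rw [← List.sum_map_add]

theorem qaSum_delta (N : Nat) (k : Int) (g : Nat → Nat) :
    ((List.range N).map (fun (i : Nat) => if (i : Int) = k then g i else 0)).sum =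
      if 0 ≤ k ∧ k < (N : Int) then g k.toNat else 0 := by
  induction N with
  | zero => simp only [List.range_zero, List.map_nil, List.sum_nil]
            rw [if_neg (by omega)]
  | succ N ih =>
    rw [List.range_succ, List.map_append, List.sum_append, ih]
    simp only [List.map_cons, List.map_nil, List.sum_cons, List.sum_nil]
    by_cases hk : (N : Int) = k
    · have h1 : ¬ (0 ≤ k ∧ k < (N : Int)) := by omega
      have h2 : 0 ≤ k ∧ k < ((N + 1 : Nat) : Int) := by push_cast; omega
      rw [if_neg h1, if_pos hk, if_pos h2]
      have : k.toNat = N := by omega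
      rw [this]
      omega
    · rw [if_neg hk]
      by_cases h1 : 0 ≤ k ∧ k < (N : Int)
      · have h2 : 0 ≤ k ∧ k < ((N + 1 : Nat) : Int) := by push_cast; omega
        rw [if_pos h1, if_pos h2]
        omega
      · have h2 : ¬ (0 ≤ k ∧ k < ((N + 1 : Nat) : Int)) := by push_cast; push_cast at h1; omega
        rw [if_neg h1, if_neg h2]
        omega

theorem qaL_inb (A : List String) : ∀ p ∈ qaL A, qaInb A p = true := by
  intro p hp
  unfold qaL at hp
  simp only [List.mem_flatMap, List.mem_range] at hp
  obtain ⟨i, hi, j, hj, hmem⟩ := hp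
  by_cases hc : qaCell A i j = '0'
  · rw [if_pos hc] at hmem; simp at hmem
  · rw [if_neg hc] at hmem
    simp only [List.mem_flatMap] at hmem
    obtain ⟨d, hd, hmem⟩ := hmem
    exact qaRay_inb A d _ _ p hmem

theorem qaCount_L (A : List String) (p : Int × Int) :
    (qaL A).count p =
      ((List.range A.length).map (fun (i : Nat) =>
        ((List.range (qaM A).toNat).map (fun (j : Nat) =>
          if qaCell A i j = '0' then 0
          else (qaDirs.map (fun d =>
            (qaRay A d (qaFuel A) ((i : Int) + d.1, (j : Int) + d.2)).count p)).sum)).sum)).sum := by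
  unfold qaL
  rw [qaCount_flatMap]
  apply qaSum_congr
  intro i hi
  rw [qaCount_flatMap]
  apply qaSum_congr
  intro j hj
  by_cases hc : qaCell A i j = '0'
  · simp [hc]
  · rw [if_neg hc, if_neg hc, qaCount_flatMap]


def qaT (A : List String) (d : Int × Int) (p : Int × Int) : Nat :=
  ((List.range A.length).map (fun (i : Nat) =>
    ((List.range (qaM A).toNat).map (fun (j : Nat) =>
      if qaCell A i j = '0' then 0
      else (qaRay A d (qaFuel A) ((i : Int) + d.1, (j : Int) + d.2)).count p)).sum)).sum

def qaT1 (A : List String) (d p : Int × Int) (i j : Nat) : Nat :=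
  if (i : Int) = p.1 - d.1 then
    (if (j : Int) = p.2 - d.2 then (if qaCell A i j ≠ '0' then 1 else 0) else 0)
  else 0

def qaT2 (A : List String) (d p : Int × Int) (i j : Nat) : Nat :=
  if qaCell A i j = '0' then 0
  else if qaCell A (p.1 - d.1) (p.2 - d.2) = '1' then 0
  else if (p.1 - d.1, p.2 - d.2) ∈ qaRay A d (qaFuel A) ((i : Int) + d.1, (j : Int) + d.2) then 1 else 0

theorem qaInb_grid (A : List String) (i j : Nat)
    (hi : i < A.length) (hj : j < (qaM A).toNat) :
    qaInb A ((i : Int), (j : Int)) = true := by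
  have := qaM_nonneg A
  simp only [qaInb, decide_eq_true_eq]
  refine ⟨by positivity, by omega, by positivity, by omega⟩

theorem qaMu_start (A : List String) (d : Int × Int) (hd : d ∈ qaDirs) (i j : Nat)
    (hi : i < A.length) (hj : j < (qaM A).toNat) :
    qaMu A d ((i : Int) + d.1, (j : Int) + d.2) < (qaFuel A : Int) := by
  have h1 := qaMu_dec A d hd ((i : Int), (j : Int))
  have h2 := qaMu_bound A d _ (qaInb_grid A i j hi hj)
  rw [qaFuel_cast]
  simp only at h1
  omega

theorem qaT_body (A : List String) (d : Int × Int) (hd : d ∈ qaDirs)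
    (p : Int × Int) (hp : qaInb A p = true) (i j : Nat)
    (hi : i < A.length) (hj : j < (qaM A).toNat) :
    (if qaCell A i j = '0' then 0
     else (qaRay A d (qaFuel A) ((i : Int) + d.1, (j : Int) + d.2)).count p)
      = qaT1 A d p i j + qaT2 A d p i j := by
  by_cases hc0 : qaCell A i j = '0'
  · rw [if_pos hc0]
    have h1 : qaT1 A d p i j = 0 := by
      unfold qaT1; split_ifs <;> simp_all
    have h2 : qaT2 A d p i j = 0 := by
      unfold qaT2; rw [if_pos hc0]
    omega
  · rw [if_neg hc0]
    have hmu := qaMu_start A d hd i j hi hj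
    have hmem := qaRay_mem_rec A d hd p hp (qaFuel A) ((i : Int) + d.1, (j : Int) + d.2) hmu hmu
    rw [qaRay_count A d hd]
    by_cases hsp : (((i : Int) + d.1, (j : Int) + d.2) : Int × Int) = p
    · -- the queen at (i,j) is the immediate neighbour of p in direction d
      have e1 : (i : Int) + d.1 = p.1 := congrArg Prod.fst hsp
      have e2 : (j : Int) + d.2 = p.2 := congrArg Prod.snd hsp
      have hmm : p ∈ qaRay A d (qaFuel A) ((i : Int) + d.1, (j : Int) + d.2) := by
        rw [hmem]; exact Or.inl hsp
      rw [if_pos hmm]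
      have hnotm : ¬ ((p.1 - d.1, p.2 - d.2) ∈
          qaRay A d (qaFuel A) ((i : Int) + d.1, (j : Int) + d.2)) := by
        rw [hsp]; exact qaRay_prev_not_mem A d hd (qaFuel A) p
      have h1 : qaT1 A d p i j = 1 := by
        unfold qaT1
        rw [if_pos (by omega), if_pos (by omega), if_pos hc0]
      have h2 : qaT2 A d p i j = 0 := by
        unfold qaT2
        rw [if_neg hc0, if_neg hnotm]
        split_ifs <;> rfl
      omega
    · have h1 : qaT1 A d p i j = 0 := by
        unfold qaT1
        split_ifs with ha hb
        · exfalso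
          apply hsp
          refine Prod.ext ?_ ?_ <;> simp <;> omega
        · rfl
        · rfl
      rw [h1]
      have hiff : (p ∈ qaRay A d (qaFuel A) ((i : Int) + d.1, (j : Int) + d.2)) ↔
          (qaCell A (p.1 - d.1) (p.2 - d.2) ≠ '1' ∧
           (p.1 - d.1, p.2 - d.2) ∈ qaRay A d (qaFuel A) ((i : Int) + d.1, (j : Int) + d.2)) := by
        rw [hmem]
        constructor
        · rintro (h | h)
          · exact absurd h hsp
          · exact h
        · exact Or.inr
      unfold qaT2
      rw [if_neg hc0]
      by_cases hone : qaCell A (p.1 - d.1) (p.2 - d.2) = '1'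
      · have hnm : ¬ p ∈ qaRay A d (qaFuel A) ((i : Int) + d.1, (j : Int) + d.2) := by
          rw [hiff]; rintro ⟨h, _⟩; exact h hone
        rw [if_neg hnm, if_pos hone]
      · rw [if_neg hone]
        by_cases hm : ((p.1 - d.1, p.2 - d.2) : Int × Int) ∈
            qaRay A d (qaFuel A) ((i : Int) + d.1, (j : Int) + d.2)
        · rw [if_pos (hiff.mpr ⟨hone, hm⟩), if_pos hm]
        · have hnm : ¬ p ∈ qaRay A d (qaFuel A) ((i : Int) + d.1, (j : Int) + d.2) := by
            rw [hiff]; rintro ⟨_, h⟩; exact hm h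
          rw [if_neg hnm, if_neg hm]

theorem qaT_split (A : List String) (d : Int × Int) (hd : d ∈ qaDirs)
    (p : Int × Int) (hp : qaInb A p = true) :
    qaT A d p =
      ((List.range A.length).map (fun (i : Nat) =>
        ((List.range (qaM A).toNat).map (fun (j : Nat) => qaT1 A d p i j)).sum)).sum +
      ((List.range A.length).map (fun (i : Nat) =>
        ((List.range (qaM A).toNat).map (fun (j : Nat) => qaT2 A d p i j)).sum)).sum := by
  unfold qaT
  rw [← List.sum_map_add]
  apply qaSum_congr
  intro i hi
  rw [← List.sum_map_add]
  apply qaSum_congr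
  intro j hj
  exact qaT_body A d hd p hp i j (List.mem_range.mp hi) (List.mem_range.mp hj)

theorem qaT1_sum (A : List String) (d p : Int × Int) :
    ((List.range A.length).map (fun (i : Nat) =>
      ((List.range (qaM A).toNat).map (fun (j : Nat) => qaT1 A d p i j)).sum)).sum =
    (if qaInb A (p.1 - d.1, p.2 - d.2) = true then
      (if qaCell A (p.1 - d.1) (p.2 - d.2) ≠ '0' then 1 else 0) else 0) := by
  have hstep : ∀ i ∈ List.range A.length,
      ((List.range (qaM A).toNat).map (fun (j : Nat) => qaT1 A d p i j)).sum =
      (if (i : Int) = p.1 - d.1 then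
        (if 0 ≤ p.2 - d.2 ∧ p.2 - d.2 < ((qaM A).toNat : Int) then
          (if qaCell A i ((p.2 - d.2).toNat) ≠ '0' then 1 else 0) else 0) else 0) := by
    intro i _
    by_cases hi1 : (i : Int) = p.1 - d.1
    · rw [if_pos hi1]
      have : ∀ j ∈ List.range (qaM A).toNat,
          qaT1 A d p i j = (if (j : Int) = p.2 - d.2 then
            (if qaCell A i j ≠ '0' then 1 else 0) else 0) := by
        intro j _; unfold qaT1; rw [if_pos hi1]
      rw [qaSum_congr _ _ _ this, qaSum_delta]
    · rw [if_neg hi1]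
      have : ∀ j ∈ List.range (qaM A).toNat, qaT1 A d p i j = 0 := by
        intro j _; unfold qaT1; rw [if_neg hi1]
      rw [qaSum_congr _ _ _ this]
      simp
  rw [qaSum_congr _ _ _ hstep, qaSum_delta]
  have hM := qaM_nonneg A
  by_cases hinb : qaInb A (p.1 - d.1, p.2 - d.2) = true
  · have hb : 0 ≤ p.1 - d.1 ∧ p.1 - d.1 < (A.length : Int) ∧
        0 ≤ p.2 - d.2 ∧ p.2 - d.2 < qaM A := by
      simpa [qaInb] using hinb
    rw [if_pos hinb, if_pos (by omega), if_pos (by omega)]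
    have hcell : qaCell A ((p.1 - d.1).toNat : Int) ((p.2 - d.2).toNat : Int)
        = qaCell A (p.1 - d.1) (p.2 - d.2) := by
      unfold qaCell
      rw [Int.toNat_natCast, Int.toNat_natCast]
    rw [hcell]
  · rw [if_neg hinb]
    have hb : ¬ (0 ≤ p.1 - d.1 ∧ p.1 - d.1 < (A.length : Int) ∧
        0 ≤ p.2 - d.2 ∧ p.2 - d.2 < qaM A) := by
      simpa [qaInb] using hinb
    by_cases h1 : 0 ≤ p.1 - d.1 ∧ p.1 - d.1 < (A.length : Int)
    · rw [if_pos h1, if_neg (by omega)]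
    · rw [if_neg h1]

theorem qaSum_zero {α : Type} (l : List α) (f : α → Nat)
    (h : ∀ x ∈ l, f x = 0) : (l.map f).sum = 0 := by
  rw [qaSum_congr _ _ (fun _ => 0) h]
  simp

theorem qaT2_sum (A : List String) (d : Int × Int) (hd : d ∈ qaDirs) (p : Int × Int) :
    ((List.range A.length).map (fun (i : Nat) =>
      ((List.range (qaM A).toNat).map (fun (j : Nat) => qaT2 A d p i j)).sum)).sum =
    (if qaInb A (p.1 - d.1, p.2 - d.2) = true then
      (if qaCell A (p.1 - d.1) (p.2 - d.2) = '1' then 0 else qaT A d (p.1 - d.1, p.2 - d.2))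
     else 0) := by
  by_cases hinb : qaInb A (p.1 - d.1, p.2 - d.2) = true
  · rw [if_pos hinb]
    by_cases hone : qaCell A (p.1 - d.1) (p.2 - d.2) = '1'
    · rw [if_pos hone]
      apply qaSum_zero
      intro i _
      apply qaSum_zero
      intro j _
      unfold qaT2
      split_ifs <;> rfl
    · rw [if_neg hone]
      unfold qaT
      apply qaSum_congr
      intro i _
      apply qaSum_congr
      intro j _
      unfold qaT2
      rw [if_neg hone, qaRay_count A d hd]
  · rw [if_neg hinb]
    apply qaSum_zero
    intro i _
    apply qaSum_zero
    intro j _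
    unfold qaT2
    split_ifs with h1 h2 h3 <;>
      first | rfl | exact absurd (qaRay_inb A d _ _ _ h3) hinb

theorem qaT_rec (A : List String) (d : Int × Int) (hd : d ∈ qaDirs)
    (p : Int × Int) (hp : qaInb A p = true) :
    qaT A d p =
      if qaInb A (p.1 - d.1, p.2 - d.2) = true then
        (if qaCell A (p.1 - d.1) (p.2 - d.2) ≠ '0' then 1 else 0) +
        (if qaCell A (p.1 - d.1) (p.2 - d.2) = '1' then 0 else qaT A d (p.1 - d.1, p.2 - d.2))
      else 0 := by
  rw [qaT_split A d hd p hp, qaT1_sum, qaT2_sum A d hd]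
  by_cases hinb : qaInb A (p.1 - d.1, p.2 - d.2) = true
  · rw [if_pos hinb, if_pos hinb, if_pos hinb]
  · rw [if_neg hinb, if_neg hinb, if_neg hinb]


theorem qaGath_eq_T (A : List String) (d : Int × Int) (hd : d ∈ qaDirs) :
    ∀ (f : Nat) (p : Int × Int), qaInb A p = true →
      qaMu A (-d.1, -d.2) p < (f : Int) →
      qaGath A (-d.1, -d.2) f (p.1 - d.1, p.2 - d.2) = (qaT A d p : Int) := by
  intro f
  induction f with
  | zero =>
    intro p hp h
    exfalso
    have := qaMu_pos A (-d.1, -d.2) p hp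
    omega
  | succ f ih =>
    intro p hp h
    have hrec := qaT_rec A d hd p hp
    simp only [qaGath]
    by_cases hinbc : qaInb A (p.1 - d.1, p.2 - d.2) = true
    · rw [if_pos hinbc, hrec, if_pos hinbc]
      push_cast
      have hmu : qaMu A (-d.1, -d.2) (p.1 - d.1, p.2 - d.2) < (f : Int) := by
        have hdec := qaMu_dec A (-d.1, -d.2) (qaDirs_neg_mem d hd) p
        have harg2 : ((p.1 + -d.1, p.2 + -d.2) : Int × Int) = (p.1 - d.1, p.2 - d.2) := by
          refine Prod.ext ?_ ?_ <;> simp <;> ring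
        rw [harg2] at hdec
        push_cast at h
        omega
      have harg : ((p.1 - d.1 + -d.1, p.2 - d.2 + -d.2) : Int × Int)
          = ((p.1 - d.1) - d.1, (p.2 - d.2) - d.2) := by
        refine Prod.ext ?_ ?_ <;> simp <;> ring
      have hih : qaGath A (-d.1, -d.2) f (p.1 - d.1 - d.1, p.2 - d.2 - d.2)
          = ((qaT A d (p.1 - d.1, p.2 - d.2) : Nat) : Int) :=
        ih (p.1 - d.1, p.2 - d.2) hinbc hmu
      split_ifs <;> first | (norm_num; done) | (rw [harg, hih])
    · rw [if_neg hinbc, hrec, if_neg hinbc]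
      simp

theorem qaFoldl_add (g : (Int × Int) → Int) :
    ∀ (l : List (Int × Int)) (a : Int),
      l.foldl (fun s e => s + g e) a = a + (l.map g).sum := by
  intro l
  induction l with
  | nil => intro a; simp
  | cons e l ih => intro a; simp [ih]; ring

theorem qaCount_eq_sum_T (A : List String) (x y : Nat) :
    ((qaL A).count ((x : Int), (y : Int)) : Nat) =
      (qaDirs.map (fun d => qaT A d ((x : Int), (y : Int)))).sum := by
  rw [qaCount_L]
  have h1 : ∀ i ∈ List.range A.length,
      ((List.range (qaM A).toNat).map (fun (j : Nat) =>
        if qaCell A i j = '0' then 0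
        else (qaDirs.map (fun d =>
          (qaRay A d (qaFuel A) ((i : Int) + d.1, (j : Int) + d.2)).count
            ((x : Int), (y : Int)))).sum)).sum
      = (qaDirs.map (fun d =>
          ((List.range (qaM A).toNat).map (fun (j : Nat) =>
            if qaCell A i j = '0' then 0
            else (qaRay A d (qaFuel A) ((i : Int) + d.1, (j : Int) + d.2)).count
              ((x : Int), (y : Int)))).sum)).sum := by
    intro i _
    rw [← qaSum_swap]
    apply qaSum_congr
    intro j _
    by_cases hc : qaCell A i j = '0'
    · rw [if_pos hc]
      symm
      apply qaSum_zero
      intro d _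
      rw [if_pos hc]
    · rw [if_neg hc]
      apply qaSum_congr
      intro d _
      rw [if_neg hc]
  rw [qaSum_congr _ _ _ h1, ← qaSum_swap]
  rfl

theorem qaEntry_eq (A : List String) (x y : Nat)
    (hx : x < A.length) (hy : y < (qaM A).toNat) :
    qaEntry (queenAttack A) x y =
      qaDirs.foldl (fun s e => s + qaGath A e (qaFuel A) ((x : Int) + e.1, (y : Int) + e.2)) 0 := by
  have hp : qaInb A ((x : Int), (y : Int)) = true := qaInb_grid A x y hx hy
  rw [qaA_eq_foldl,
      qaEntry_foldl A x y hx hy (qaL A) _ (qaShape_init A) (qaL_inb A),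
      qaEntry_init, qaFoldl_add, qaCount_eq_sum_T]
  have hterm : ∀ d ∈ qaDirs, ((qaT A d ((x : Int), (y : Int)) : Nat) : Int)
      = qaGath A (-d.1, -d.2) (qaFuel A) ((x : Int) - d.1, (y : Int) - d.2) := by
    intro d hd
    symm
    apply qaGath_eq_T A d hd (qaFuel A) ((x : Int), (y : Int)) hp
    have := qaMu_bound A (-d.1, -d.2) ((x : Int), (y : Int)) hp
    rw [qaFuel_cast]
    omega
  rw [Nat.cast_list_sum, List.map_map]
  simp only [Function.comp_def]
  rw [qaSum_congr _ _ _ hterm]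
  simp only [qaDirs, List.map_cons, List.map_nil, List.sum_cons, List.sum_nil]
  norm_num
  simp only [← sub_eq_add_neg]
  ring

theorem queenAttack_shape (A : List String) : qaShape A (queenAttack A) := by
  rw [qaA_eq_foldl]
  exact qaShape_foldl A _ _ (qaShape_init A)

-- ===== VERDICT (by name: the statement is the Claim_ definition above) =====
theorem queenAttack_spec : Claim_equal_queenAttack := by
  intro A _hdom _hpre
  unfold Spec_queenAttack
  obtain ⟨hlen, hrow⟩ := queenAttack_shape A
  apply List.ext_getElem
  · rw [hlen]; simp [queenAttack_alt]
  intro x h1 h2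
  have hxA : x < A.length := by rw [← hlen]; exact h1
  apply List.ext_getElem
  · rw [hrow x h1]; simp [queenAttack_alt]
  intro y hy1 hy2
  have hyM : y < (qaM A).toNat := by
    have := hrow x h1; omega
  have hL : (queenAttack A)[x][y] = qaEntry (queenAttack A) x y := by
    unfold qaEntry
    rw [List.getD_eq_getElem (queenAttack A) [] h1, List.getD_eq_getElem _ 0 hy1]
  rw [hL, qaEntry_eq A x y hxA hyM]
  simp [queenAttack_alt]
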